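-- pv_equiv track=rewrite | github.com/vadim-zyamalov/project-euler | Problems 001-050/p29_forum.py | recurse
-- ===== SOURCE A (Python) =====
-- from math import lcm
--
-- def recurse(step, index, sign, lower_b, upper_b, queue, n):
--     if step > upper_b:
--         return 0
--     res = sign * (upper_b // step - (lower_b - 1) // step)
--     for i in range(index + 1, len(queue)):
--         res += recurse(
--             lcm(step, queue[i]), i, -sign, lower_b, upper_b, queue, n
--         )
--     return res
-- ===== SOURCE B (Python) =====
-- from math import lcm
--
-- def recurse(step, index, sign, lower_b, upper_b, queue, n):
--     total = 0
--     stack = [(step, index, sign)]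
--     while stack:
--         s, idx, sg = stack.pop()
--         if s > upper_b:
--             continue
--         total += sg * (upper_b // s - (lower_b - 1) // s)
--         for i in range(idx + 1, len(queue)):
--             stack.append((lcm(s, queue[i]), i, -sg))
--     return total
-- ===== Notes on version B (the rewrite author's own statement) =====
-- stated objective: alternative
-- what changed: Replaces A's self-recursion over subset lcm steps by an explicit iterative depth-first search: a worklist of (step, index, sign) frames popped in a loop, each contributing sign*(upper_b//step - (lower_b-1)//step) and pushing child frames (lcm(step, queue[i]), i, -sign); an accumulator replaces the call stack.
import Mathlib
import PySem

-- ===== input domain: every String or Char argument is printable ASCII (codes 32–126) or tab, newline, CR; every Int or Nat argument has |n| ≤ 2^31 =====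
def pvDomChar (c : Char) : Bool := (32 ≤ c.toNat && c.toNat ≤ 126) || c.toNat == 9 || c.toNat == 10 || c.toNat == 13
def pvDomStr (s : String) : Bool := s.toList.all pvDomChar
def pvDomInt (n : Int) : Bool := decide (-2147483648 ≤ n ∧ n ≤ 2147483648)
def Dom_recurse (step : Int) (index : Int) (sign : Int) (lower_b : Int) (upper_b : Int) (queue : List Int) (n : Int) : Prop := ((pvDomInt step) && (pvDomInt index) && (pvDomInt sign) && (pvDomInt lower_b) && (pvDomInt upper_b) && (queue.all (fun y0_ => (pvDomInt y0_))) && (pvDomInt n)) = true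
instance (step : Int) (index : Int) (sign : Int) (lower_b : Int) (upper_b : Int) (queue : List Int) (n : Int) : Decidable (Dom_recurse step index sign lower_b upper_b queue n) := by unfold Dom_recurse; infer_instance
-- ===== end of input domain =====

-- B replaces A's recursion by an explicit iterative DFS over a worklist of (step, index, sign)
-- frames with an accumulator (objective: alternative decomposition, same cost).

-- math.lcm of two ints: nonnegative lcm (exact: math.lcm(a,b) = |a*b|//gcd, and Int.lcm = Nat.lcm of natAbs)
def pvLcm (a b : Int) : Int := (Int.lcm a b : Int)

-- ===== PORT A =====
-- structural totality fuel: the recursion depth is < (len(queue) - index) + 1 (the index strictly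
-- increases and stays below len(queue)), so the fuel recurse supplies never runs out (proved below)
def recurseFuel (fuel : Nat) (step : Int) (index : Int) (sign : Int) (lower_b : Int) (upper_b : Int) (queue : List Int) (n : Int) : Int :=
  match fuel with
  | 0 => 0
  | Nat.succ fuel =>
    if step > upper_b then 0
    else
      (PySem.List.pyRange (index + 1) (queue.length : Int) 1).foldl
        (fun res i => res + recurseFuel fuel (pvLcm step (PySem.List.pyGetD queue i 0)) i (-sign) lower_b upper_b queue n)
        (sign * (PySem.Int.floordiv upper_b step - PySem.Int.floordiv (lower_b - 1) step))

def recurse (step : Int) (index : Int) (sign : Int) (lower_b : Int) (upper_b : Int) (queue : List Int) (n : Int) : Int :=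
  recurseFuel (((queue.length : Int) - index).toNat + 1) step index sign lower_b upper_b queue n

-- ===== PORT B =====
-- the while-loop over the worklist, with a structural totality fuel counting loop iterations;
-- the fuel recurse_alt supplies (1 pop for a pruned seed, else 3^(len-index+2)) never runs out (proved below)
def altLoopFuel (fuel : Nat) (lower_b : Int) (upper_b : Int) (queue : List Int) (n : Int)
    (stack : List (Int × Int × Int)) (total : Int) : Int :=
  match fuel, stack with
  | _, [] => total
  | 0, _ => total
  | Nat.succ fuel, (s, idx, sg) :: rest =>
      if s > upper_b then altLoopFuel fuel lower_b upper_b queue n rest total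
      else
        altLoopFuel fuel lower_b upper_b queue n
          (((PySem.List.pyRange (idx + 1) (queue.length : Int) 1).map
              (fun i => (pvLcm s (PySem.List.pyGetD queue i 0), i, -sg))).reverse ++ rest)
          (total + sg * (PySem.Int.floordiv upper_b s - PySem.Int.floordiv (lower_b - 1) s))

def recurse_alt (step : Int) (index : Int) (sign : Int) (lower_b : Int) (upper_b : Int) (queue : List Int) (n : Int) : Int :=
  altLoopFuel (if step > upper_b then 1 else 3 ^ (((queue.length : Int) - index).toNat + 2))
    lower_b upper_b queue n [(step, index, sign)] 0

-- ===== PRECONDITION & SPEC =====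
-- Pre_ excludes exactly the inputs on which Python A raises: step = 0 while step ≤ upper_b
-- (ZeroDivisionError), a loop index below -len(queue) (IndexError on queue[i]), or a zero in the
-- reachable part of queue when 0 ≤ upper_b (ZeroDivisionError in a recursive call).
def Pre_recurse (step : Int) (index : Int) (sign : Int) (lower_b : Int) (upper_b : Int) (queue : List Int) (n : Int) : Prop :=
  step ≤ upper_b →
    (step ≠ 0 ∧ -(queue.length : Int) ≤ index + 1 ∧
      (0 ≤ upper_b → ∀ i ∈ PySem.List.pyRange (index + 1) (queue.length : Int) 1,
        PySem.List.pyGetD queue i 0 ≠ 0))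
instance (step : Int) (index : Int) (sign : Int) (lower_b : Int) (upper_b : Int) (queue : List Int) (n : Int) : Decidable (Pre_recurse step index sign lower_b upper_b queue n) := by unfold Pre_recurse; infer_instance

def pvWitness_recurse : Int × Int × Int × Int × Int × List Int × Int := (2, 0, 1, 1, 10, [2, 3], 5)

def Spec_recurse (step : Int) (index : Int) (sign : Int) (lower_b : Int) (upper_b : Int) (queue : List Int) (n : Int) (out : Int) : Prop := out = recurse_alt step index sign lower_b upper_b queue n
instance (step : Int) (index : Int) (sign : Int) (lower_b : Int) (upper_b : Int) (queue : List Int) (n : Int) (out : Int) : Decidable (Spec_recurse step index sign lower_b upper_b queue n out) := by unfold Spec_recurse; infer_instance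

-- ===== CLAIM (what is proved, stated in full; the proofs are below) =====
def Claim_equal_recurse : Prop := ∀ (step : Int) (index : Int) (sign : Int) (lower_b : Int) (upper_b : Int) (queue : List Int) (n : Int), Dom_recurse step index sign lower_b upper_b queue n → Pre_recurse step index sign lower_b upper_b queue n → Spec_recurse step index sign lower_b upper_b queue n (recurse step index sign lower_b upper_b queue n)

-- ===== LEMMAS AND PROOFS =====

-- the fuel does not matter once it exceeds the recursion depth
theorem recurseFuel_congr (lower_b upper_b : Int) (queue : List Int) (n : Int) :
    ∀ (f g : Nat) (step index sign : Int),
      ((queue.length : Int) - index).toNat < f → ((queue.length : Int) - index).toNat < g →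
      recurseFuel f step index sign lower_b upper_b queue n = recurseFuel g step index sign lower_b upper_b queue n := by
  intro f
  induction f with
  | zero => intro g step index sign hf; omega
  | succ f ih =>
      intro g step index sign hf hg
      match g, hg with
      | Nat.succ g, _ =>
        simp only [recurseFuel]
        split
        · rfl
        · apply PySem.List.foldl_congr_mem
          intro acc i hi
          have hb := (PySem.List.mem_pyRange_one).1 hi
          rw [ih g (pvLcm step (PySem.List.pyGetD queue i 0)) i (-sign) (by omega) (by omega)]

-- one-step characterisation of A's recursion
theorem recurseFuel_eq (lower_b upper_b : Int) (queue : List Int) (n : Int)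
    (f : Nat) (step index sign : Int) (hf : ((queue.length : Int) - index).toNat < f) :
    recurseFuel f step index sign lower_b upper_b queue n =
      if step > upper_b then 0
      else sign * (PySem.Int.floordiv upper_b step - PySem.Int.floordiv (lower_b - 1) step) +
        ((PySem.List.pyRange (index + 1) (queue.length : Int) 1).map
          (fun i => recurse (pvLcm step (PySem.List.pyGetD queue i 0)) i (-sign) lower_b upper_b queue n)).sum := by
  match f, hf with
  | Nat.succ f, _ =>
    simp only [recurseFuel]
    split
    · rfl
    · rw [PySem.List.foldl_add]
      congr 1
      refine congrArg List.sum (List.map_congr_left ?_)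
      intro i hi
      have hb := (PySem.List.mem_pyRange_one).1 hi
      have hr : recurse (pvLcm step (PySem.List.pyGetD queue i 0)) i (-sign) lower_b upper_b queue n
          = recurseFuel (((queue.length : Int) - i).toNat + 1) (pvLcm step (PySem.List.pyGetD queue i 0)) i (-sign) lower_b upper_b queue n := rfl
      rw [hr]
      exact recurseFuel_congr lower_b upper_b queue n _ _ (pvLcm step (PySem.List.pyGetD queue i 0)) i (-sign) (by omega) (by omega)

theorem recurse_eq (step index sign lower_b upper_b : Int) (queue : List Int) (n : Int) :
    recurse step index sign lower_b upper_b queue n =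
      if step > upper_b then 0
      else sign * (PySem.Int.floordiv upper_b step - PySem.Int.floordiv (lower_b - 1) step) +
        ((PySem.List.pyRange (index + 1) (queue.length : Int) 1).map
          (fun i => recurse (pvLcm step (PySem.List.pyGetD queue i 0)) i (-sign) lower_b upper_b queue n)).sum :=
  recurseFuel_eq lower_b upper_b queue n _ step index sign (by omega)

-- worklist measure: each frame weighs 3^(len - idx); children of a popped frame weigh strictly less
def pvMeasure (queue : List Int) (stack : List (Int × Int × Int)) : Nat :=
  (stack.map (fun f => 3 ^ (((queue.length : Int) - f.2.1).toNat))).sum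

theorem pvSumPow_lt (b : Int) : ∀ (a : Int),
    (((PySem.List.pyRange a b 1).map (fun i => 3 ^ ((b - i).toNat))).sum) < 3 ^ ((b - a + 1).toNat) := by
  intro a
  by_cases hab : b ≤ a
  · rw [PySem.List.pyRange_one_eq_nil hab]
    simpa using Nat.pow_pos (n := (b - a + 1).toNat) (by norm_num : 0 < 3)
  · push_neg at hab
    have hk : ∃ k : Nat, (b - a).toNat = k := ⟨_, rfl⟩
    obtain ⟨k, hkeq⟩ := hk
    induction k generalizing a with
    | zero => omega
    | succ m ih =>
      rw [PySem.List.pyRange_one_cons hab]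
      simp only [List.map_cons, List.sum_cons]
      by_cases hab2 : b ≤ a + 1
      · have : a + 1 = b := by omega
        rw [PySem.List.pyRange_one_eq_nil hab2]
        simp only [List.map_nil, List.sum_nil, Nat.add_zero]
        have h1 : (b - a).toNat = 1 := by omega
        have h2 : (b - a + 1).toNat = 2 := by omega
        rw [h1, h2]; norm_num
      · push_neg at hab2
        have ihh := ih (a + 1) hab2 (by omega)
        have e1 : (b - (a + 1) + 1).toNat = (b - a).toNat := by omega
        have e2 : (b - a + 1).toNat = (b - a).toNat + 1 := by omega
        rw [e1] at ihh
        rw [e2, pow_succ]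
        have hp : (1:Nat) ≤ 3 ^ ((b - a).toNat) := Nat.one_le_pow _ _ (by norm_num)
        omega

-- B's loop, with fuel at least the worklist measure, sums A's values over the worklist
theorem altLoopFuel_eq (lower_b upper_b : Int) (queue : List Int) (n : Int) :
    ∀ (fuel : Nat) (stack : List (Int × Int × Int)) (total : Int), pvMeasure queue stack ≤ fuel →
    altLoopFuel fuel lower_b upper_b queue n stack total =
      total + (stack.map (fun f => recurse f.1 f.2.1 f.2.2 lower_b upper_b queue n)).sum := by
  intro fuel
  induction fuel with
  | zero =>
      intro stack total hm
      match stack with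
      | [] => simp [altLoopFuel]
      | (s, idx, sg) :: rest =>
          exfalso
          have hp : (1:Nat) ≤ 3 ^ (((queue.length : Int) - idx).toNat) := Nat.one_le_pow _ _ (by norm_num)
          simp only [pvMeasure, List.map_cons, List.sum_cons] at hm
          omega
  | succ fuel ih =>
      intro stack total hm
      match stack with
      | [] => simp [altLoopFuel]
      | (s, idx, sg) :: rest =>
          have hp : (1:Nat) ≤ 3 ^ (((queue.length : Int) - idx).toNat) := Nat.one_le_pow _ _ (by norm_num)
          simp only [pvMeasure, List.map_cons, List.sum_cons] at hm
          simp only [altLoopFuel]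
          split
          · rw [ih rest total (by simpa [pvMeasure] using (by omega : (List.map (fun f => 3 ^ (((queue.length : Int) - f.2.1).toNat)) rest).sum ≤ fuel))]
            simp only [List.map_cons, List.sum_cons]
            rw [recurse_eq]
            simp only [if_pos ‹s > upper_b›]
            ring
          · have hcb := pvSumPow_lt (queue.length : Int) (idx + 1)
            have e : ((queue.length : Int) - (idx + 1) + 1).toNat = (((queue.length : Int)) - idx).toNat := by omega
            rw [e] at hcb
            have hm' : pvMeasure queue
                (((PySem.List.pyRange (idx + 1) (queue.length : Int) 1).map
                    (fun i => (pvLcm s (PySem.List.pyGetD queue i 0), i, -sg))).reverse ++ rest) ≤ fuel := by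
              simp only [pvMeasure, List.map_append, List.sum_append, List.map_reverse, List.sum_reverse, List.map_map]
              have e2 : ((fun f : Int × Int × Int => 3 ^ (((queue.length : Int) - f.2.1).toNat)) ∘
                  (fun i => (pvLcm s (PySem.List.pyGetD queue i 0), i, -sg)))
                  = (fun i : Int => 3 ^ (((queue.length : Int) - i).toNat)) := rfl
              rw [e2]
              omega
            rw [ih _ _ hm']
            simp only [List.map_cons, List.sum_cons, List.map_append, List.sum_append,
              List.map_reverse, List.sum_reverse, List.map_map]
            rw [recurse_eq (step := s) (index := idx) (sign := sg)]
            simp only [if_neg ‹¬ s > upper_b›]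
            have e3 : ((fun f : Int × Int × Int => recurse f.1 f.2.1 f.2.2 lower_b upper_b queue n) ∘
                (fun i => (pvLcm s (PySem.List.pyGetD queue i 0), i, -sg)))
                = (fun i : Int => recurse (pvLcm s (PySem.List.pyGetD queue i 0)) i (-sg) lower_b upper_b queue n) := rfl
            rw [e3]
            ring

-- ===== VERDICT (by name: the statement is the Claim_ definition above) =====
theorem recurse_spec : Claim_equal_recurse := by
  intro step index sign lower_b upper_b queue n _ _
  unfold Spec_recurse recurse_alt
  by_cases h : step > upper_b
  · simp only [if_pos h, altLoopFuel, if_pos h]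
    rw [recurse_eq]
    simp [h]
  · rw [if_neg h]
    rw [altLoopFuel_eq lower_b upper_b queue n _ _ _ (by
      simp only [pvMeasure, List.map_cons, List.map_nil, List.sum_cons, List.sum_nil, Nat.add_zero]
      exact Nat.pow_le_pow_right (by norm_num) (by omega))]
    simp
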